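-- pv_equiv track=rewrite | github.com/W-Mai/Cha | cha-parser/tests/fixtures/simple.py | complex_function
-- ===== SOURCE A (Python) =====
-- from typing import List, Optional
--
-- def complex_function(data: List[int], threshold: int = 10) -> Optional[int]:
--     """Find first value above threshold."""
--     result = None
--     for item in data:
--         if item > threshold:
--             result = item
--             break
--         elif item == threshold:
--             # exact match
--             result = item
--     return result
-- ===== SOURCE B (Python) =====
-- def complex_function(data, threshold=10):
--     """Find first value above threshold."""
--     idx = next((i for i, x in enumerate(data) if x > threshold), None)
--     if idx is not None:
--         return data[idx]
--     return threshold if threshold in data else None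
-- ===== Notes on version B (the rewrite author's own statement) =====
-- stated objective: simpler
-- what changed: Replaces the single pass with break/accumulator by a two-phase structure: find the index of the first above-threshold element and return it, otherwise a membership test for an exact match (whose value can only be the threshold itself).
import Mathlib
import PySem

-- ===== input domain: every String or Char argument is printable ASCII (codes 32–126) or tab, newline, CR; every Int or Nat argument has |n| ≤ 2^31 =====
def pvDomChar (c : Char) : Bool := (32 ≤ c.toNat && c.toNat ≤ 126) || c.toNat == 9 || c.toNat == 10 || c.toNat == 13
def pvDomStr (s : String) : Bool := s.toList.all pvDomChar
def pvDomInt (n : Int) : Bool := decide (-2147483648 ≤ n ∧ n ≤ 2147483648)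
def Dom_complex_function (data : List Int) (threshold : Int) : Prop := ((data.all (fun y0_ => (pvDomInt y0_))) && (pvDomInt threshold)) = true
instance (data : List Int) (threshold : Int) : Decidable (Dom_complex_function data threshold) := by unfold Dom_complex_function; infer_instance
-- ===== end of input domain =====

-- B replaces A's single pass with break/accumulator by a find-first-above-threshold phase and,
-- failing that, a membership test for an exact match (objective: simpler).


-- ===== PORT A =====
-- the for-loop with `break`, carrying the accumulator `result`
def complexFunctionLoopA (threshold : Int) (result : Option Int) : List Int → Option Int
  | [] => result
  | item :: rest =>
    if item > threshold then some item
    else if item == threshold then complexFunctionLoopA threshold (some item) rest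
    else complexFunctionLoopA threshold result rest

def complex_function (data : List Int) (threshold : Int) : Option Int :=
  complexFunctionLoopA threshold none data

-- ===== PORT B =====
def complex_function_alt (data : List Int) (threshold : Int) : Option Int :=
  match data.findIdx? (fun x => x > threshold) with
  | some i => data[i]?
  | none => if data.contains threshold then some threshold else none

-- ===== PRECONDITION & SPEC =====
def Spec_complex_function (data : List Int) (threshold : Int) (out : Option Int) : Prop := out = complex_function_alt data threshold
instance (data : List Int) (threshold : Int) (out : Option Int) : Decidable (Spec_complex_function data threshold out) := by unfold Spec_complex_function; infer_instance

-- ===== CLAIM (what is proved, stated in full; the proofs are below) =====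
def Claim_equal_complex_function : Prop := ∀ (data : List Int) (threshold : Int), Dom_complex_function data threshold → Spec_complex_function data threshold (complex_function data threshold)

-- ===== LEMMAS AND PROOFS =====
theorem complexFunctionLoop_eq (threshold : Int) (data : List Int) (r : Option Int) :
    complexFunctionLoopA threshold r data =
      match data.findIdx? (fun x => x > threshold) with
      | some i => data[i]?
      | none => if data.contains threshold then some threshold else r := by
  induction data generalizing r with
  | nil => simp [complexFunctionLoopA]
  | cons x xs ih =>
    rw [complexFunctionLoopA, List.findIdx?_cons]
    by_cases hx : x > threshold
    · simp [hx]
    · have hx' : decide (x > threshold) = false := by simpa using hx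
      rw [if_neg hx, hx']
      simp only [Bool.false_eq_true, if_false]
      cases hfi : List.findIdx? (fun x => decide (x > threshold)) xs with
      | some i =>
        by_cases he : x = threshold <;> simp [he, ih, hfi]
      | none =>
        by_cases he : x = threshold
        · subst he; simp [ih, hfi]
        · have hne : threshold ≠ x := fun h => he h.symm
          simp [ih, hfi, he, hne]

-- ===== VERDICT (by name: the statement is the Claim_ definition above) =====
theorem complex_function_spec : Claim_equal_complex_function := by
  intro data threshold _
  unfold Spec_complex_function complex_function complex_function_alt
  rw [complexFunctionLoop_eq]
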